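-- pv_equiv track=rewrite | github.com/GurjyotSingh740-gk/DAA-Budget-Optimization-Project | daaproject.py | optimize_budget
-- ===== SOURCE A (Python) =====
-- def optimize_budget(expenses, priorities, savings_goal):
--     expense_list = [(k, v, priorities[k]) for k, v in expenses.items()]
--     n = len(expense_list)
--     dp = [[0] * (savings_goal + 1) for _ in range(n + 1)]
--
--     for i in range(1, n + 1):
--         for w in range(savings_goal + 1):
--             category, cost, priority = expense_list[i - 1]
--             if cost <= w:
--                 dp[i][w] = max(priority + dp[i - 1][w - cost], dp[i - 1][w])
--             else:
--                 dp[i][w] = dp[i - 1][w]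
--
--     w = savings_goal
--     adjustments = []
--     for i in range(n, 0, -1):
--         if dp[i][w] != dp[i - 1][w]:
--             category, cost, priority = expense_list[i - 1]
--             adjustments.append((category, cost))
--             w -= cost
--
--     return adjustments
-- ===== SOURCE B (Python) =====
-- def optimize_budget(expenses, priorities, savings_goal):
--     items = [(k, v, priorities[k]) for k, v in expenses.items()]
--     n = len(items)
--     memo = {}
--
--     def solve(i, w):
--         # max total priority achievable with the first i items within budget w
--         if i == 0:
--             return 0
--         key = (i, w)
--         if key in memo:
--             return memo[key]
--         _, cost, priority = items[i - 1]
--         if cost <= w: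
--             best = max(priority + solve(i - 1, w - cost), solve(i - 1, w))
--         else:
--             best = solve(i - 1, w)
--         memo[key] = best
--         return best
--
--     adjustments = []
--     w = savings_goal
--     for i in range(n, 0, -1):
--         if solve(i, w) != solve(i - 1, w):
--             category, cost, _ = items[i - 1]
--             adjustments.append((category, cost))
--             w -= cost
--     return adjustments
-- ===== Notes on version B (the rewrite author's own statement) =====
-- stated objective: faster
-- what changed: Replaces the bottom-up (n+1)x(goal+1) DP table and in-place row filling by a top-down memoized recursion solve(i,w) that only visits reachable (i,budget) states (at most min(2^n, n*goal), far fewer when the goal is large), with reconstruction reading the memo instead of the table; Pre_ excludes exactly the inputs where A raises (KeyError on a missing priority key, IndexError for a negative cost or a negative savings_goal with non-empty expenses) plus dict well-formedness (distinct keys).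
-- crash fix: On well-keyed inputs with non-empty expenses and a negative savings_goal, or a negative cost, A raises IndexError while B returns the natural knapsack selection (e.g. [] for a negative goal). — e.g. on optimize_budget([("rent", 3)], [("rent", 5)], -2): A raises IndexError, B returns []
import Mathlib
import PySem

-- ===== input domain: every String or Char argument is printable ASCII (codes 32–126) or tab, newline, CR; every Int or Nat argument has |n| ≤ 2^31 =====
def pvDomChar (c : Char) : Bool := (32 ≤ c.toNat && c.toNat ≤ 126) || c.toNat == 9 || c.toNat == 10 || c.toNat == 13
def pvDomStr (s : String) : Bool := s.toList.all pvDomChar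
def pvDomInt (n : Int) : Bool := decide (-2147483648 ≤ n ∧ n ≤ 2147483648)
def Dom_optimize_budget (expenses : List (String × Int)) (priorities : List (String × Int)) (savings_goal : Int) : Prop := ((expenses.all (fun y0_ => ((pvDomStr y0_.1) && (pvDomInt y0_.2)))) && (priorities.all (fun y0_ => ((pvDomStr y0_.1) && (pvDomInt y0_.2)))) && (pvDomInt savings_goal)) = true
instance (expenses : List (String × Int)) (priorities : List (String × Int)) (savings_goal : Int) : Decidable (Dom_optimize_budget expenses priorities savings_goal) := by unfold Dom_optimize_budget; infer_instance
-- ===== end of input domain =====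

-- B replaces A's full (n+1)×(goal+1) bottom-up DP table by a top-down memoized
-- recursion that only visits the reachable (i, budget) states; 'faster' only if the
-- timing run confirms it, otherwise an alternative decomposition of the same DP.

-- ===== PORT A =====
-- dp[i][w] read/write; exact for the in-range non-negative indices used under Pre_
def pvGet2 (dp : List (List Int)) (i w : Int) : Int := (dp.getD i.toNat []).getD w.toNat 0
def pvSet2 (dp : List (List Int)) (i w : Int) (v : Int) : List (List Int) :=
  dp.set i.toNat ((dp.getD i.toNat []).set w.toNat v)

def optimize_budget (expenses : List (String × Int)) (priorities : List (String × Int)) (savings_goal : Int) : List (String × Int) :=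
  -- priorities[k]: getD is exact here since Pre_ requires every key to be present
  let expense_list : List (String × Int × Int) :=
    expenses.map (fun kv => (kv.1, kv.2, (PySem.Dict.mk priorities).getD kv.1 0))
  let n : Nat := expense_list.length
  let dp : List (List Int) :=
    List.replicate (n + 1) (List.replicate (savings_goal + 1).toNat 0)
  let dp :=
    (PySem.List.pyRange 1 ((n : Int) + 1) 1).foldl (fun dp i =>
      (PySem.List.pyRange 0 (savings_goal + 1) 1).foldl (fun dp w =>
        let t := expense_list.getD (i - 1).toNat ("", 0, 0)
        let cost := t.2.1
        let priority := t.2.2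
        if cost ≤ w then
          pvSet2 dp i w (max (priority + pvGet2 dp (i - 1) (w - cost)) (pvGet2 dp (i - 1) w))
        else
          pvSet2 dp i w (pvGet2 dp (i - 1) w)) dp) dp
  let res :=
    (PySem.List.pyRange (n : Int) 0 (-1)).foldl (fun (st : Int × List (String × Int)) i =>
      let w := st.1
      let adjustments := st.2
      if pvGet2 dp i w ≠ pvGet2 dp (i - 1) w then
        let t := expense_list.getD (i - 1).toNat ("", 0, 0)
        (w - t.2.1, adjustments ++ [(t.1, t.2.1)])
      else (w, adjustments)) (savings_goal, [])
  res.2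

-- ===== PORT B =====
-- solve(i, w) with the memo dict threaded through; i is the non-negative item count
def pvSolve (items : List (String × Int × Int)) :
    Nat → Int → PySem.Dict (Int × Int) Int → Int × PySem.Dict (Int × Int) Int
  | 0, _, memo => (0, memo)
  | i + 1, w, memo =>
    match memo.get? (((i : Int) + 1), w) with
    | some v => (v, memo)
    | none =>
      let t := items.getD i ("", 0, 0)
      let cost := t.2.1
      let priority := t.2.2
      let r :=
        if cost ≤ w then
          let r1 := pvSolve items i (w - cost) memo
          let r2 := pvSolve items i w r1.2
          (max (priority + r1.1) r2.1, r2.2)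
        else
          pvSolve items i w memo
      (r.1, r.2.insert (((i : Int) + 1), w) r.1)

def pvRebuild (items : List (String × Int × Int)) :
    Nat → Int → PySem.Dict (Int × Int) Int → List (String × Int) → List (String × Int)
  | 0, _, _, adj => adj
  | i + 1, w, memo, adj =>
    let r1 := pvSolve items (i + 1) w memo
    let r2 := pvSolve items i w r1.2
    if r1.1 ≠ r2.1 then
      let t := items.getD i ("", 0, 0)
      pvRebuild items i (w - t.2.1) r2.2 (adj ++ [(t.1, t.2.1)])
    else
      pvRebuild items i w r2.2 adj

def optimize_budget_alt (expenses : List (String × Int)) (priorities : List (String × Int)) (savings_goal : Int) : List (String × Int) :=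
  let items : List (String × Int × Int) :=
    expenses.map (fun kv => (kv.1, kv.2, (PySem.Dict.mk priorities).getD kv.1 0))
  pvRebuild items items.length savings_goal PySem.Dict.empty []

-- ===== PRECONDITION & SPEC =====
-- Pre_ excludes exactly the inputs where A raises: a KeyError when some expense key is
-- missing from priorities, and the IndexErrors reached when some cost is negative or when
-- savings_goal is negative with a non-empty expense dict; the Nodup conditions only state
-- that the association lists are well-formed Python dicts (distinct keys).
def Pre_optimize_budget (expenses : List (String × Int)) (priorities : List (String × Int)) (savings_goal : Int) : Prop :=
  (expenses.map Prod.fst).Nodup ∧ (priorities.map Prod.fst).Nodup ∧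
  (∀ kv ∈ expenses, kv.1 ∈ priorities.map Prod.fst ∧ 0 ≤ kv.2) ∧
  (0 ≤ savings_goal ∨ expenses = [])
instance (expenses : List (String × Int)) (priorities : List (String × Int)) (savings_goal : Int) : Decidable (Pre_optimize_budget expenses priorities savings_goal) := by unfold Pre_optimize_budget; infer_instance
def pvWitness_optimize_budget : (List (String × Int)) × (List (String × Int)) × Int :=
  ([("rent", 3), ("food", 2)], [("rent", 5), ("food", 4)], 4)

-- A raises (KeyError-free inputs with a negative savings_goal and non-empty expenses, or
-- with some negative cost, hit an IndexError) while B's recursion simply returns the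
-- correct knapsack selection there.
def Raises_optimize_budget (expenses : List (String × Int)) (priorities : List (String × Int)) (savings_goal : Int) : Prop :=
  (expenses.map Prod.fst).Nodup ∧ (priorities.map Prod.fst).Nodup ∧
  (∀ kv ∈ expenses, kv.1 ∈ priorities.map Prod.fst) ∧ expenses ≠ [] ∧
  (savings_goal < 0 ∨ (0 ≤ savings_goal ∧ ∃ kv ∈ expenses, kv.2 < 0))
instance (expenses : List (String × Int)) (priorities : List (String × Int)) (savings_goal : Int) : Decidable (Raises_optimize_budget expenses priorities savings_goal) := by unfold Raises_optimize_budget; infer_instance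
def pvRaiseWitness_optimize_budget : (List (String × Int)) × (List (String × Int)) × Int :=
  ([("rent", 3)], [("rent", 5)], -2)
def pvRaiseWitnessOut_optimize_budget : List (String × Int) := []

def Spec_optimize_budget (expenses : List (String × Int)) (priorities : List (String × Int)) (savings_goal : Int) (out : List (String × Int)) : Prop := out = optimize_budget_alt expenses priorities savings_goal
instance (expenses : List (String × Int)) (priorities : List (String × Int)) (savings_goal : Int) (out : List (String × Int)) : Decidable (Spec_optimize_budget expenses priorities savings_goal out) := by unfold Spec_optimize_budget; infer_instance

-- ===== CLAIM (what is proved, stated in full; the proofs are below) =====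
def Claim_equal_optimize_budget : Prop := ∀ (expenses : List (String × Int)) (priorities : List (String × Int)) (savings_goal : Int), Dom_optimize_budget expenses priorities savings_goal → Pre_optimize_budget expenses priorities savings_goal → Spec_optimize_budget expenses priorities savings_goal (optimize_budget expenses priorities savings_goal)
def Claim_raises_optimize_budget : Prop := (∀ (expenses : List (String × Int)) (priorities : List (String × Int)) (savings_goal : Int), Dom_optimize_budget expenses priorities savings_goal → Raises_optimize_budget expenses priorities savings_goal → ¬ Pre_optimize_budget expenses priorities savings_goal) ∧ (Dom_optimize_budget (pvRaiseWitness_optimize_budget.1) (pvRaiseWitness_optimize_budget.2.1) (pvRaiseWitness_optimize_budget.2.2) ∧ Raises_optimize_budget (pvRaiseWitness_optimize_budget.1) (pvRaiseWitness_optimize_budget.2.1) (pvRaiseWitness_optimize_budget.2.2) ∧ optimize_budget_alt (pvRaiseWitness_optimize_budget.1) (pvRaiseWitness_optimize_budget.2.1) (pvRaiseWitness_optimize_budget.2.2) = pvRaiseWitnessOut_optimize_budget)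

-- ===== LEMMAS AND PROOFS =====

-- the common mathematical value: max total priority of a subset of the first i items of cost ≤ w
def pvBest (items : List (String × Int × Int)) : Nat → Int → Int
  | 0, _ => 0
  | i + 1, w =>
    let t := items.getD i ("", 0, 0)
    if t.2.1 ≤ w then max (t.2.2 + pvBest items i (w - t.2.1)) (pvBest items i w)
    else pvBest items i w

def pvInv (items : List (String × Int × Int)) (memo : PySem.Dict (Int × Int) Int) : Prop :=
  ∀ p v, memo.get? p = some v → 0 ≤ p.1 ∧ v = pvBest items p.1.toNat p.2

theorem pvSolve_correct (items : List (String × Int × Int)) :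
    ∀ (i : Nat) (w : Int) (memo : PySem.Dict (Int × Int) Int), pvInv items memo →
      (pvSolve items i w memo).1 = pvBest items i w ∧ pvInv items (pvSolve items i w memo).2 := by
  intro i
  induction i with
  | zero => intro w memo h; exact ⟨rfl, h⟩
  | succ i ih =>
    intro w memo h
    rw [pvSolve]
    cases hg : memo.get? (((i : Nat) : Int) + 1, w) with
    | some v =>
      have := h _ _ hg
      simp at this
      constructor
      · simp only []
        rw [this.2]
      · exact h
    | none =>
      simp only []
      set t := items.getD i ("", 0, 0) with ht
      by_cases hc : t.2.1 ≤ w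
      · simp only [if_pos hc]
        obtain ⟨h1, hI1⟩ := ih (w - t.2.1) memo h
        obtain ⟨h2, hI2⟩ := ih w _ hI1
        have hval : max (t.2.2 + (pvSolve items i (w - t.2.1) memo).1)
            (pvSolve items i w (pvSolve items i (w - t.2.1) memo).2).1 = pvBest items (i+1) w := by
          rw [h1, h2, pvBest, if_pos hc]
        refine ⟨hval, ?_⟩
        intro p v hp
        rw [PySem.Dict.get?_insert] at hp
        split_ifs at hp with hpe
        · cases hp
          subst hpe
          constructor
          · positivity
          · rw [hval]; norm_num
        · exact hI2 _ _ hp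
      · simp only [if_neg hc]
        obtain ⟨h1, hI1⟩ := ih w memo h
        have hval : (pvSolve items i w memo).1 = pvBest items (i+1) w := by
          rw [h1, pvBest, if_neg hc]
        refine ⟨hval, ?_⟩
        intro p v hp
        rw [PySem.Dict.get?_insert] at hp
        split_ifs at hp with hpe
        · cases hp
          subst hpe
          exact ⟨by positivity, by rw [hval]; norm_num⟩
        · exact hI1 _ _ hp

def pvPure (items : List (String × Int × Int)) : Nat → Int → List (String × Int) → List (String × Int)
  | 0, _, adj => adj
  | i + 1, w, adj =>
    let t := items.getD i ("", 0, 0)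
    if pvBest items (i + 1) w ≠ pvBest items i w then
      pvPure items i (w - t.2.1) (adj ++ [(t.1, t.2.1)])
    else pvPure items i w adj

theorem pvRebuild_correct (items : List (String × Int × Int)) :
    ∀ (i : Nat) (w : Int) (memo : PySem.Dict (Int × Int) Int) (adj : List (String × Int)),
      pvInv items memo → pvRebuild items i w memo adj = pvPure items i w adj := by
  intro i
  induction i with
  | zero => intro w memo adj h; rfl
  | succ i ih =>
    intro w memo adj h
    obtain ⟨h1, hI1⟩ := pvSolve_correct items (i + 1) w memo h
    obtain ⟨h2, hI2⟩ := pvSolve_correct items i w _ hI1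
    rw [pvRebuild, pvPure]
    simp only [h1, h2]
    split_ifs with hne
    · exact ih _ _ _ hI2
    · exact ih _ _ _ hI2

theorem alt_eq_pure (expenses priorities : List (String × Int)) (savings_goal : Int) :
    optimize_budget_alt expenses priorities savings_goal =
      pvPure (expenses.map (fun kv => (kv.1, kv.2, (PySem.Dict.mk priorities).getD kv.1 0)))
        (expenses.length) savings_goal [] := by
  rw [optimize_budget_alt]
  simp only [List.length_map]
  exact pvRebuild_correct _ _ _ _ _ (by intro p v hp; simp [PySem.Dict.get?_empty] at hp)

-- ===== A-side =====
theorem len_set2 (dp : List (List Int)) (i w : Int) (v : Int) :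
    (pvSet2 dp i w v).length = dp.length := List.length_set ..

theorem row_set2_ne (dp : List (List Int)) (i w : Int) (v : Int) (j : Nat) (hj : j ≠ i.toNat) :
    (pvSet2 dp i w v).getD j [] = dp.getD j [] := by
  simp [pvSet2, List.getD_eq_getElem?_getD, List.getElem?_set_ne (Ne.symm hj)]

theorem row_set2_self (dp : List (List Int)) (i w : Int) (v : Int) (h : i.toNat < dp.length) :
    (pvSet2 dp i w v).getD i.toNat [] = (dp.getD i.toNat []).set w.toNat v := by
  simp [pvSet2, List.getD_eq_getElem?_getD, List.getElem?_set_self h]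

theorem rowlen_set2 (dp : List (List Int)) (i w : Int) (v : Int) (j : Nat) :
    ((pvSet2 dp i w v).getD j []).length = (dp.getD j []).length := by
  by_cases hj : j = i.toNat
  · rw [hj]
    by_cases h : i.toNat < dp.length
    · rw [row_set2_self dp i w v h]; exact List.length_set ..
    · have h1 : dp[i.toNat]? = none := List.getElem?_eq_none (by omega)
      have h2 : (pvSet2 dp i w v)[i.toNat]? = none := by
        apply List.getElem?_eq_none
        rw [len_set2]; omega
      simp [List.getD_eq_getElem?_getD, h1, h2]
  · rw [row_set2_ne dp i w v j hj]

theorem get2_set2_self (dp : List (List Int)) (i w : Int) (v : Int)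
    (hi : i.toNat < dp.length) (hw : w.toNat < (dp.getD i.toNat []).length) :
    pvGet2 (pvSet2 dp i w v) i w = v := by
  rw [pvGet2, row_set2_self dp i w v hi, List.getD_eq_getElem?_getD,
    List.getElem?_set_self hw]
  rfl

theorem get2_set2_ne_col (dp : List (List Int)) (i w : Int) (v : Int) (w' : Int)
    (hw : w'.toNat ≠ w.toNat) :
    pvGet2 (pvSet2 dp i w v) i w' = pvGet2 dp i w' := by
  by_cases h : i.toNat < dp.length
  · rw [pvGet2, row_set2_self dp i w v h, pvGet2]
    simp [List.getD_eq_getElem?_getD, List.getElem?_set_ne (Ne.symm hw)]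
  · have h1 : dp[i.toNat]? = none := List.getElem?_eq_none (by omega)
    have h2 : (pvSet2 dp i w v)[i.toNat]? = none := by
      apply List.getElem?_eq_none; rw [len_set2]; omega
    simp [pvGet2, List.getD_eq_getElem?_getD, h1, h2]

theorem inner_correct (items : List (String × Int × Int)) (goal : Int) (hg : 0 ≤ goal)
    (i' : Nat) (hin : i' + 1 ≤ items.length)
    (hcost : 0 ≤ (items.getD i' ("", 0, 0)).2.1) :
    ∀ (k : Nat) (a : Int) (dp : List (List Int)), 0 ≤ a → ((goal + 1) - a).toNat = k →
      dp.length = items.length + 1 →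
      (∀ j, j < dp.length → (dp.getD j []).length = (goal + 1).toNat) →
      (∀ w : Int, 0 ≤ w → w ≤ goal → pvGet2 dp (((i' + 1 : Nat) : Int) - 1) w = pvBest items i' w) →
      ((PySem.List.pyRange a (goal + 1) 1).foldl (fun dp w =>
          let t := items.getD (((i' + 1 : Nat) : Int) - 1).toNat ("", 0, 0)
          let cost := t.2.1
          let priority := t.2.2
          if cost ≤ w then
            pvSet2 dp ((i' + 1 : Nat) : Int) w
              (max (priority + pvGet2 dp (((i' + 1 : Nat) : Int) - 1) (w - cost))
                (pvGet2 dp (((i' + 1 : Nat) : Int) - 1) w))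
          else
            pvSet2 dp ((i' + 1 : Nat) : Int) w (pvGet2 dp (((i' + 1 : Nat) : Int) - 1) w)) dp).length = dp.length ∧
      (∀ j, j ≠ i' + 1 → ((PySem.List.pyRange a (goal + 1) 1).foldl (fun dp w =>
          let t := items.getD (((i' + 1 : Nat) : Int) - 1).toNat ("", 0, 0)
          let cost := t.2.1
          let priority := t.2.2
          if cost ≤ w then
            pvSet2 dp ((i' + 1 : Nat) : Int) w
              (max (priority + pvGet2 dp (((i' + 1 : Nat) : Int) - 1) (w - cost))
                (pvGet2 dp (((i' + 1 : Nat) : Int) - 1) w))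
          else
            pvSet2 dp ((i' + 1 : Nat) : Int) w (pvGet2 dp (((i' + 1 : Nat) : Int) - 1) w)) dp).getD j [] = dp.getD j []) ∧
      (∀ j, j < dp.length → (((PySem.List.pyRange a (goal + 1) 1).foldl (fun dp w =>
          let t := items.getD (((i' + 1 : Nat) : Int) - 1).toNat ("", 0, 0)
          let cost := t.2.1
          let priority := t.2.2
          if cost ≤ w then
            pvSet2 dp ((i' + 1 : Nat) : Int) w
              (max (priority + pvGet2 dp (((i' + 1 : Nat) : Int) - 1) (w - cost))
                (pvGet2 dp (((i' + 1 : Nat) : Int) - 1) w))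
          else
            pvSet2 dp ((i' + 1 : Nat) : Int) w (pvGet2 dp (((i' + 1 : Nat) : Int) - 1) w)) dp).getD j []).length = (goal + 1).toNat) ∧
      (∀ w : Int, 0 ≤ w → w < a → pvGet2 ((PySem.List.pyRange a (goal + 1) 1).foldl (fun dp w =>
          let t := items.getD (((i' + 1 : Nat) : Int) - 1).toNat ("", 0, 0)
          let cost := t.2.1
          let priority := t.2.2
          if cost ≤ w then
            pvSet2 dp ((i' + 1 : Nat) : Int) w
              (max (priority + pvGet2 dp (((i' + 1 : Nat) : Int) - 1) (w - cost))
                (pvGet2 dp (((i' + 1 : Nat) : Int) - 1) w))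
          else
            pvSet2 dp ((i' + 1 : Nat) : Int) w (pvGet2 dp (((i' + 1 : Nat) : Int) - 1) w)) dp) ((i' + 1 : Nat) : Int) w = pvGet2 dp ((i' + 1 : Nat) : Int) w) ∧
      (∀ w : Int, a ≤ w → w ≤ goal → pvGet2 ((PySem.List.pyRange a (goal + 1) 1).foldl (fun dp w =>
          let t := items.getD (((i' + 1 : Nat) : Int) - 1).toNat ("", 0, 0)
          let cost := t.2.1
          let priority := t.2.2
          if cost ≤ w then
            pvSet2 dp ((i' + 1 : Nat) : Int) w
              (max (priority + pvGet2 dp (((i' + 1 : Nat) : Int) - 1) (w - cost))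
                (pvGet2 dp (((i' + 1 : Nat) : Int) - 1) w))
          else
            pvSet2 dp ((i' + 1 : Nat) : Int) w (pvGet2 dp (((i' + 1 : Nat) : Int) - 1) w)) dp) ((i' + 1 : Nat) : Int) w = pvBest items (i' + 1) w) := by
  intro k
  induction k with
  | zero =>
    intro a dp ha hk hlen hRL hprev
    rw [PySem.List.pyRange_one_eq_nil (by omega : goal + 1 ≤ a)]
    exact ⟨rfl, fun j _ => rfl, hRL, fun w _ _ => rfl, fun w hw1 hw2 => absurd hw1 (by omega)⟩
  | succ k ih =>
    intro a dp ha hk hlen hRL hprev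
    have hidx : (((i' + 1 : Nat) : Int) - 1).toNat = i' := by omega
    have hiN : ((i' + 1 : Nat) : Int).toNat = i' + 1 := by omega
    rw [PySem.List.pyRange_one_cons (by omega : a < goal + 1), List.foldl_cons]
    have hstep : (let t := items.getD (((i' + 1 : Nat) : Int) - 1).toNat ("", 0, 0)
        let cost := t.2.1
        let priority := t.2.2
        if cost ≤ a then
          pvSet2 dp ((i' + 1 : Nat) : Int) a
            (max (priority + pvGet2 dp (((i' + 1 : Nat) : Int) - 1) (a - cost))
              (pvGet2 dp (((i' + 1 : Nat) : Int) - 1) a))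
        else
          pvSet2 dp ((i' + 1 : Nat) : Int) a (pvGet2 dp (((i' + 1 : Nat) : Int) - 1) a)) =
        (if (items.getD i' ("", 0, 0)).2.1 ≤ a then
          pvSet2 dp ((i' + 1 : Nat) : Int) a
            (max ((items.getD i' ("", 0, 0)).2.2 +
                pvGet2 dp (((i' + 1 : Nat) : Int) - 1) (a - (items.getD i' ("", 0, 0)).2.1))
              (pvGet2 dp (((i' + 1 : Nat) : Int) - 1) a))
        else
          pvSet2 dp ((i' + 1 : Nat) : Int) a (pvGet2 dp (((i' + 1 : Nat) : Int) - 1) a)) := by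
      simp only [hidx]
    obtain ⟨v, hv, hdp⟩ : ∃ v, v = pvBest items (i' + 1) a ∧
        (if (items.getD i' ("", 0, 0)).2.1 ≤ a then
          pvSet2 dp ((i' + 1 : Nat) : Int) a
            (max ((items.getD i' ("", 0, 0)).2.2 +
                pvGet2 dp (((i' + 1 : Nat) : Int) - 1) (a - (items.getD i' ("", 0, 0)).2.1))
              (pvGet2 dp (((i' + 1 : Nat) : Int) - 1) a))
        else
          pvSet2 dp ((i' + 1 : Nat) : Int) a (pvGet2 dp (((i' + 1 : Nat) : Int) - 1) a)) =
          pvSet2 dp ((i' + 1 : Nat) : Int) a v := by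
      by_cases hc : (items.getD i' ("", 0, 0)).2.1 ≤ a
      · refine ⟨_, ?_, if_pos hc⟩
        rw [hprev _ (by omega) (by omega), hprev _ (by omega) (by omega), pvBest]
        simp only [if_pos hc]
      · refine ⟨_, ?_, if_neg hc⟩
        rw [hprev _ (by omega) (by omega), pvBest]
        simp only [if_neg hc]
    rw [hstep, hdp]
    set dp₁ := pvSet2 dp ((i' + 1 : Nat) : Int) a v with hdp₁def
    have f1 : dp₁.length = dp.length := len_set2 ..
    have f2 : ∀ j, j ≠ i' + 1 → dp₁.getD j [] = dp.getD j [] := by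
      intro j hj
      exact row_set2_ne dp _ a v j (by rw [hiN]; exact hj)
    have f3 : ∀ j, j < dp₁.length → (dp₁.getD j []).length = (goal + 1).toNat := by
      intro j hj
      rw [rowlen_set2]
      exact hRL j (by rw [← f1]; exact hj)
    have hprev₁ : ∀ w : Int, 0 ≤ w → w ≤ goal →
        pvGet2 dp₁ (((i' + 1 : Nat) : Int) - 1) w = pvBest items i' w := by
      intro w hw1 hw2
      have h0 := hprev w hw1 hw2
      rw [pvGet2, hidx] at h0 ⊢
      rw [f2 i' (by omega)]
      exact h0
    obtain ⟨C1, C2, C3, C4, C5⟩ := ih (a + 1) dp₁ (by omega) (by omega)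
      (by rw [f1, hlen]) f3 hprev₁
    refine ⟨C1.trans f1, ?_, ?_, ?_, ?_⟩
    · intro j hj; rw [C2 j hj, f2 j hj]
    · intro j hj
      rw [f1] at C3
      exact C3 j hj
    · intro w hw1 hw2
      rw [C4 w hw1 (by omega), hdp₁def, get2_set2_ne_col dp _ a v w (by omega)]
    · intro w hw1 hw2
      rcases eq_or_lt_of_le hw1 with rfl | hlt
      · rw [C4 a (by omega) (by omega), hdp₁def,
          get2_set2_self dp _ a v (by rw [hiN, hlen]; omega)
            (by rw [hRL (((i' + 1 : Nat) : Int)).toNat (by rw [hiN, hlen]; omega)]; omega),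
          hv]
      · exact C5 w (by omega) hw2

theorem outer_correct (items : List (String × Int × Int)) (goal : Int) (hg : 0 ≤ goal)
    (hcosts : ∀ j, j < items.length → 0 ≤ (items.getD j ("", 0, 0)).2.1) :
    ∀ (k : Nat) (a : Int) (dp : List (List Int)), 1 ≤ a → (((items.length : Int) + 1) - a).toNat = k →
      dp.length = items.length + 1 →
      (∀ j, j < dp.length → (dp.getD j []).length = (goal + 1).toNat) →
      (∀ j : Nat, (j : Int) < a → ∀ w : Int, 0 ≤ w → w ≤ goal → pvGet2 dp (j : Int) w = pvBest items j w) →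
      ∀ j : Nat, j ≤ items.length → ∀ w : Int, 0 ≤ w → w ≤ goal →
        pvGet2 ((PySem.List.pyRange a ((items.length : Int) + 1) 1).foldl (fun dp i =>
          (PySem.List.pyRange 0 (goal + 1) 1).foldl (fun dp w =>
            let t := items.getD (i - 1).toNat ("", 0, 0)
            let cost := t.2.1
            let priority := t.2.2
            if cost ≤ w then
              pvSet2 dp i w (max (priority + pvGet2 dp (i - 1) (w - cost)) (pvGet2 dp (i - 1) w))
            else pvSet2 dp i w (pvGet2 dp (i - 1) w)) dp) dp) (j : Int) w = pvBest items j w := by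
  intro k
  induction k with
  | zero =>
    intro a dp ha hk hlen hRL hdone j hj w hw1 hw2
    rw [PySem.List.pyRange_one_eq_nil (show (items.length : Int) + 1 ≤ a by omega),
      List.foldl_nil]
    exact hdone j (by omega) w hw1 hw2
  | succ k ih =>
    intro a dp ha hk hlen hRL hdone j hj w hw1 hw2
    rw [PySem.List.pyRange_one_cons (by omega : a < (items.length : Int) + 1), List.foldl_cons]
    obtain ⟨i', rfl⟩ : ∃ i', a = ((i' + 1 : Nat) : Int) := ⟨a.toNat - 1, by omega⟩
    have hin : i' + 1 ≤ items.length := by omega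
    have hprev : ∀ w : Int, 0 ≤ w → w ≤ goal →
        pvGet2 dp (((i' + 1 : Nat) : Int) - 1) w = pvBest items i' w := by
      intro w hw1 hw2
      have he : (((i' + 1 : Nat) : Int) - 1) = (i' : Int) := by omega
      rw [he]
      exact hdone i' (by omega) w hw1 hw2
    obtain ⟨C1, C2, C3, C4, C5⟩ := inner_correct items goal hg i' hin (hcosts i' (by omega))
      (goal + 1).toNat 0 dp le_rfl (by omega) hlen hRL hprev
    refine ih (((i' + 1 : Nat) : Int) + 1) _ (by omega) (by omega) (C1.trans hlen)
      (by rw [C1]; exact C3) ?_ j hj w hw1 hw2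
    intro j' hj' w' hw1' hw2'
    by_cases hje : j' = i' + 1
    · subst hje
      exact C5 w' hw1' hw2'
    · have hcast : ((j' : Int)).toNat = j' := by omega
      rw [pvGet2, hcast, C2 j' hje]
      have hj2 : (j' : Int) < ((i' + 1 : Nat) : Int) := by omega
      have h0 := hdone j' hj2 w' hw1' hw2'
      rwa [pvGet2, hcast] at h0

theorem recon_correct (items : List (String × Int × Int)) (goal : Int) (_hg : 0 ≤ goal)
    (hcosts : ∀ j, j < items.length → 0 ≤ (items.getD j ("", 0, 0)).2.1)
    (dp : List (List Int))
    (htab : ∀ j : Nat, j ≤ items.length → ∀ w : Int, 0 ≤ w → w ≤ goal →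
      pvGet2 dp (j : Int) w = pvBest items j w) :
    ∀ (i : Nat), i ≤ items.length → ∀ (w : Int) (adj : List (String × Int)), 0 ≤ w → w ≤ goal →
      ((PySem.List.pyRange (i : Int) 0 (-1)).foldl (fun (st : Int × List (String × Int)) i =>
        let w := st.1
        let adjustments := st.2
        if pvGet2 dp i w ≠ pvGet2 dp (i - 1) w then
          let t := items.getD (i - 1).toNat ("", 0, 0)
          (w - t.2.1, adjustments ++ [(t.1, t.2.1)])
        else (w, adjustments)) (w, adj)).2 = pvPure items i w adj := by
  intro i
  induction i with
  | zero =>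
    intro _ w adj hw1 hw2
    rw [show ((0 : Nat) : Int) = (0 : Int) by omega,
      PySem.List.pyRange_neg_one_eq_nil (le_refl (0 : Int)), List.foldl_nil]
    rfl
  | succ i ih =>
    intro hle w adj hw1 hw2
    rw [PySem.List.pyRange_neg_one_cons (show (0 : Int) < ((i + 1 : Nat) : Int) by omega),
      List.foldl_cons]
    show (List.foldl _
      (if pvGet2 dp ((i + 1 : Nat) : Int) w ≠ pvGet2 dp (((i + 1 : Nat) : Int) - 1) w then
        (w - (items.getD (((i + 1 : Nat) : Int) - 1).toNat ("", 0, 0)).2.1,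
          adj ++ [((items.getD (((i + 1 : Nat) : Int) - 1).toNat ("", 0, 0)).1,
            (items.getD (((i + 1 : Nat) : Int) - 1).toNat ("", 0, 0)).2.1)])
      else (w, adj))
      (PySem.List.pyRange (((i + 1 : Nat) : Int) - 1) 0 (-1))).2 = pvPure items (i + 1) w adj
    have hidx : (((i + 1 : Nat) : Int) - 1) = ((i : Nat) : Int) := by omega
    have hnat : (((i : Nat) : Int)).toNat = i := by omega
    rw [hidx, hnat, htab (i + 1) (by omega) w hw1 hw2, htab i (by omega) w hw1 hw2]
    have hcost := hcosts i (by omega)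
    by_cases hne : pvBest items (i + 1) w ≠ pvBest items i w
    · rw [if_pos hne]
      have hcle : (items.getD i ("", 0, 0)).2.1 ≤ w := by
        by_contra hcgt
        apply hne
        rw [pvBest]
        simp only [if_neg hcgt]
      rw [ih (by omega) (w - (items.getD i ("", 0, 0)).2.1) _ (by omega) (by omega), pvPure]
      simp only [if_pos hne]
    · rw [if_neg hne, ih (by omega) w adj hw1 hw2, pvPure]
      simp only [if_neg hne]

theorem getD_replicate_row {α : Type} (n k : Nat) (r d : α) (h : k < n) :
    (List.replicate n r).getD k d = r := by
  rw [List.getD_eq_getElem?_getD, List.getElem?_replicate, if_pos h]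
  rfl

theorem getD_replicate_zero (G k : Nat) : (List.replicate G (0 : Int)).getD k 0 = 0 := by
  rcases lt_or_ge k G with h | h
  · exact getD_replicate_row G k 0 0 h
  · rw [List.getD_eq_getElem?_getD, List.getElem?_replicate, if_neg (by omega)]
    rfl

theorem optimize_budget_spec : Claim_equal_optimize_budget := by
  unfold Claim_equal_optimize_budget Spec_optimize_budget
  intro expenses priorities savings_goal hDom hPre
  obtain ⟨hnd1, hnd2, hkv, hgoal⟩ := hPre
  have hcosts : ∀ j, j < (expenses.map (fun kv =>
      (kv.1, kv.2, (PySem.Dict.mk priorities).getD kv.1 0))).length →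
      0 ≤ ((expenses.map (fun kv =>
        (kv.1, kv.2, (PySem.Dict.mk priorities).getD kv.1 0))).getD j ("", 0, 0)).2.1 := by
    intro j hj
    rw [List.length_map] at hj
    rw [List.getD_eq_getElem?_getD, List.getElem?_map, List.getElem?_eq_getElem hj]
    exact (hkv _ (List.getElem_mem hj)).2
  rcases hgoal with hg0 | hempty
  · -- main case: 0 ≤ savings_goal
    rw [optimize_budget, alt_eq_pure]
    simp only []
    have htab := outer_correct
      (expenses.map (fun kv => (kv.1, kv.2, (PySem.Dict.mk priorities).getD kv.1 0)))
      savings_goal hg0 hcosts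
      (((expenses.map (fun kv => (kv.1, kv.2, (PySem.Dict.mk priorities).getD kv.1 0))).length : Int) + 1 - 1).toNat
      1
      (List.replicate ((expenses.map (fun kv => (kv.1, kv.2, (PySem.Dict.mk priorities).getD kv.1 0))).length + 1)
        (List.replicate (savings_goal + 1).toNat 0))
      le_rfl rfl
      (by rw [List.length_replicate])
      (by
        intro j hj
        rw [List.length_replicate] at hj
        rw [List.getD_eq_getElem?_getD, List.getElem?_replicate, if_pos hj]
        exact List.length_replicate)
      (by
        intro j hj w hw1 hw2
        have hj0 : j = 0 := by omega
        subst hj0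
        rw [pvGet2]
        have h0 : ((0 : Nat) : Int).toNat = 0 := by omega
        rw [h0, getD_replicate_row _ _ _ _ (by omega), getD_replicate_zero]
        rfl)
    have hrec := recon_correct
      (expenses.map (fun kv => (kv.1, kv.2, (PySem.Dict.mk priorities).getD kv.1 0)))
      savings_goal hg0 hcosts _ htab
      ((expenses.map (fun kv => (kv.1, kv.2, (PySem.Dict.mk priorities).getD kv.1 0))).length)
      le_rfl savings_goal [] hg0 le_rfl
    rw [hrec, List.length_map]
  · -- expenses = [] (A returns [] whatever savings_goal is)
    subst hempty
    rw [optimize_budget, alt_eq_pure]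
    simp only [List.map_nil, List.length_nil]
    rw [show ((0 : Nat) : Int) + 1 = (1 : Int) by omega,
      PySem.List.pyRange_one_eq_nil (by omega : (1 : Int) ≤ 1), List.foldl_nil,
      show ((0 : Nat) : Int) = (0 : Int) by omega,
      PySem.List.pyRange_neg_one_eq_nil (le_refl (0 : Int)), List.foldl_nil]
    rfl

theorem optimize_budget_raises : Claim_raises_optimize_budget := by
  unfold Claim_raises_optimize_budget
  constructor
  · intro e p g hdom hr hpre
    obtain ⟨_, _, hk, hne, hbad⟩ := hr
    obtain ⟨_, _, hkv, hg⟩ := hpre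
    rcases hbad with hneg | ⟨hge, kv, hmem, hneg⟩
    · rcases hg with h | h
      · omega
      · exact hne h
    · exact absurd (hkv kv hmem).2 (by omega)
  · exact ⟨by decide, by decide, by decide⟩

-- self-check: the raise-witness value claimed for B is the one its port computes
theorem pvRaiseWitnessOut_ok : optimize_budget_alt (pvRaiseWitness_optimize_budget.1)
    (pvRaiseWitness_optimize_budget.2.1) (pvRaiseWitness_optimize_budget.2.2) =
    pvRaiseWitnessOut_optimize_budget := optimize_budget_raises.2.2.2
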